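-- pv_equiv track=rewrite | github.com/collinsakuma/LeetCode | Problems/2982. FInd Longest Special Substring That Occurs Thrice II/longest_substring_occurince_thirce.py | maximumLength
-- ===== SOURCE A (Python) =====
-- from collections import defaultdict
--
-- def maximumLength(s):
--     n = len(s)
--     map = defaultdict(list)
--     l = 0
--
--     while l < n:
--         r = l
--         while r < n and s[l] == s[r]:
--             r += 1
--         for i in range(r-l, max(0, r - l - 4), -1):
--             map[s[l]].append(i)
--         l = r
--     output = -1
--
--     for key in map:
--         if len(map[key]) >= 3:
--             output = max(output, sorted(map[key])[-3])
--     return output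
-- ===== SOURCE B (Python) =====
-- from collections import defaultdict
--
-- def maximumLength(s):
--     n = len(s)
--     runs = []
--     i = 0
--     while i < n:
--         j = i
--         while j < n and s[j] == s[i]:
--             j += 1
--         runs.append((s[i], j - i))
--         i = j
--     groups = defaultdict(list)
--     for c, k in runs:
--         groups[c].append(k)
--
--     def feasible(L):
--         return any(sum(k - L + 1 for k in ks if k >= L) >= 3
--                    for ks in groups.values())
--
--     best = -1
--     lo, hi = 1, n
--     while lo <= hi:
--         mid = (lo + hi) // 2
--         if feasible(mid):
--             best = mid
--             lo = mid + 1
--         else: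
--             hi = mid - 1
--     return best
-- ===== Notes on version B (the rewrite author's own statement) =====
-- stated objective: alternative
-- what changed: Replaces A's per-run top-4 candidate lists collected in a dict with a per-character sort and third-largest lookup by a run-length decomposition, a monotone per-character feasibility count (sum of max(0, run-L+1) reaching 3), and a binary search for the largest feasible length.
import Mathlib
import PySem

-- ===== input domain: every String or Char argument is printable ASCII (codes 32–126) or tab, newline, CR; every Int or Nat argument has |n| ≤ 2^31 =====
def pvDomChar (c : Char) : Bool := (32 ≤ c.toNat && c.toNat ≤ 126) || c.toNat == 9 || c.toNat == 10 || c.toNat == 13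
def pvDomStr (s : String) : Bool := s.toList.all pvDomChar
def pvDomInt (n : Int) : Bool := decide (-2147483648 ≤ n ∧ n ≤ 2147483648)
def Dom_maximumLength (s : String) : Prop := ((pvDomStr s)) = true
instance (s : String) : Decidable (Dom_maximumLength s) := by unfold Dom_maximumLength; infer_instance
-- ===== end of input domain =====

-- B replaces A's per-run top-4 candidate lists + per-character sort + third-largest trick by a
-- run decomposition with a per-character feasibility count and a binary search on the answer
-- (objective: alternative algorithm).

-- ===== PORT A =====
-- inner 'while r < n and s[l] == s[r]: r += 1' (the identical inner while loop of both Pythons)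
def pvRunEnd (cs : List Char) (n l r : Nat) : Nat :=
  if _h : r < n ∧ cs.getD l ' ' = cs.getD r ' ' then pvRunEnd cs n l (r + 1) else r
termination_by n - r

-- r ≤ result (needed only for the outer loops' termination)
theorem pvRunEnd_ge (cs : List Char) (n l r : Nat) : r ≤ pvRunEnd cs n l r := by
  rw [pvRunEnd]
  split
  · have := pvRunEnd_ge cs n l (r + 1); omega
  · exact Nat.le_refl r
termination_by n - r

theorem pvRunEnd_gt (cs : List Char) (n l : Nat) (h : l < n) : l < pvRunEnd cs n l l := by
  rw [pvRunEnd]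
  simp only [h, true_and, dite_eq_ite, if_true]
  have := pvRunEnd_ge cs n l (l + 1)
  omega

-- 'for i in range(r-l, max(0, r-l-4), -1): map[s[l]].append(i)'
def pvAStep (m : PySem.Dict Char (List Int)) (c : Char) (k : Int) : PySem.Dict Char (List Int) :=
  (PySem.List.pyRange k (max 0 (k - 4)) (-1)).foldl
    (fun m i => m.insert c (m.getD c [] ++ [i])) m

-- outer 'while l < n' loop of A
def pvALoop (cs : List Char) (n l : Nat) (m : PySem.Dict Char (List Int)) :
    PySem.Dict Char (List Int) :=
  if h : l < n then
    pvALoop cs n (pvRunEnd cs n l l)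
      (pvAStep m (cs.getD l ' ') ((pvRunEnd cs n l l : Int) - (l : Int)))
  else m
termination_by n - l
decreasing_by have := pvRunEnd_gt cs n l h; omega

def maximumLength (s : String) : Int :=
  let cs := s.toList
  let n := cs.length
  let m := pvALoop cs n 0 PySem.Dict.empty
  m.keys.foldl
    (fun out k =>
      if 3 ≤ (m.getD k []).length then
        max out ((PySem.List.pyGet? (PySem.List.sorted (m.getD k []) (fun x => x)) (-3)).getD 0)
      else out)
    (-1)

-- ===== PORT B =====
-- 'while i < n: j = i; while j < n and s[j] == s[i]: j += 1; runs.append((s[i], j - i)); i = j'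
def pvRunsLoop (cs : List Char) (n i : Nat) (acc : List (Char × Int)) : List (Char × Int) :=
  if h : i < n then
    pvRunsLoop cs n (pvRunEnd cs n i i)
      (acc ++ [(cs.getD i ' ', (pvRunEnd cs n i i : Int) - (i : Int))])
  else acc
termination_by n - i
decreasing_by have := pvRunEnd_gt cs n i h; omega

-- 'for c, k in runs: groups[c].append(k)'
def pvGroups (runs : List (Char × Int)) : PySem.Dict Char (List Int) :=
  runs.foldl (fun d p => d.insert p.1 (d.getD p.1 [] ++ [p.2])) PySem.Dict.empty

-- 'def feasible(L): return any(sum(k - L + 1 for k in ks if k >= L) >= 3 for ks in groups.values())'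
def pvFeasible (g : PySem.Dict Char (List Int)) (L : Int) : Bool :=
  g.values.any (fun ks =>
    decide (3 ≤ ((ks.filter (fun k => decide (L ≤ k))).map (fun k => k - L + 1)).sum))

-- 'while lo <= hi: mid = (lo + hi) // 2; if feasible(mid): best = mid; lo = mid + 1 else: hi = mid - 1'
def pvBisect (g : PySem.Dict Char (List Int)) (lo hi best : Int) : Int :=
  if h : lo ≤ hi then
    let mid := PySem.Int.floordiv (lo + hi) 2
    if pvFeasible g mid then pvBisect g (mid + 1) hi mid
    else pvBisect g lo (mid - 1) best
  else best
termination_by (hi + 1 - lo).toNat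
decreasing_by
  all_goals have := PySem.Int.floordiv_two_mid_bounds h
  all_goals omega

def maximumLength_alt (s : String) : Int :=
  let cs := s.toList
  let n := cs.length
  let runs := pvRunsLoop cs n 0 []
  pvBisect (pvGroups runs) 1 (n : Int) (-1)

-- ===== PRECONDITION & SPEC =====
def Spec_maximumLength (s : String) (out : Int) : Prop := out = maximumLength_alt s
instance (s : String) (out : Int) : Decidable (Spec_maximumLength s out) := by unfold Spec_maximumLength; infer_instance

-- ===== CLAIM (what is proved, stated in full; the proofs are below) =====
def Claim_equal_maximumLength : Prop := ∀ (s : String), Dom_maximumLength s → Spec_maximumLength s (maximumLength s)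

-- ===== LEMMAS AND PROOFS =====

-- unfolding equations for the loops
theorem pvRunsLoop_pos (cs : List Char) (n i : Nat) (acc : List (Char × Int)) (h : i < n) :
    pvRunsLoop cs n i acc =
      pvRunsLoop cs n (pvRunEnd cs n i i)
        (acc ++ [(cs.getD i ' ', (pvRunEnd cs n i i : Int) - (i : Int))]) := by
  rw [pvRunsLoop]; rw [dif_pos h]

theorem pvRunsLoop_neg (cs : List Char) (n i : Nat) (acc : List (Char × Int)) (h : ¬ i < n) :
    pvRunsLoop cs n i acc = acc := by
  rw [pvRunsLoop]; rw [dif_neg h]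

theorem pvALoop_pos (cs : List Char) (n l : Nat) (m : PySem.Dict Char (List Int)) (h : l < n) :
    pvALoop cs n l m =
      pvALoop cs n (pvRunEnd cs n l l)
        (pvAStep m (cs.getD l ' ') ((pvRunEnd cs n l l : Int) - (l : Int))) := by
  rw [pvALoop]; rw [dif_pos h]

theorem pvALoop_neg (cs : List Char) (n l : Nat) (m : PySem.Dict Char (List Int)) (h : ¬ l < n) :
    pvALoop cs n l m = m := by
  rw [pvALoop]; rw [dif_neg h]

-- the candidate list A generates per run of length k
def pvCand (k : Int) : List Int := PySem.List.pyRange k (max 0 (k - 4)) (-1)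

-- run lengths of character c
def pvKsOf (runs : List (Char × Int)) (c : Char) : List Int :=
  (runs.filter (fun p => p.1 == c)).map (·.2)

-- B's per-character feasibility count
def pvTsum (L : Int) (ks : List Int) : Int :=
  ((ks.filter (fun k => decide (L ≤ k))).map (fun k => k - L + 1)).sum

-- the common specification: L is a feasible length
def pvG (runs : List (Char × Int)) (L : Int) : Prop :=
  1 ≤ L ∧ ∃ c, 3 ≤ pvTsum L (pvKsOf runs c)

-- x is the greatest feasible length (-1 if none)
def pvBest (runs : List (Char × Int)) (x : Int) : Prop :=
  (x = -1 ∧ ∀ L, ¬ pvG runs L) ∨ (pvG runs x ∧ ∀ L, pvG runs L → L ≤ x)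

theorem pvBest_unique (runs : List (Char × Int)) (x y : Int)
    (hx : pvBest runs x) (hy : pvBest runs y) : x = y := by
  rcases hx with ⟨hx1, hx2⟩ | ⟨hx1, hx2⟩ <;> rcases hy with ⟨hy1, hy2⟩ | ⟨hy1, hy2⟩
  · omega
  · exact absurd hy1 (hx2 y)
  · exact absurd hx1 (hy2 x)
  · exact le_antisymm (hy2 x hx1) (hx2 y hy1)

-- ---- loops to runs ----
theorem pvRunEnd_le (cs : List Char) (n l r : Nat) (h : r ≤ n) : pvRunEnd cs n l r ≤ n := by
  rw [pvRunEnd]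
  split
  · exact pvRunEnd_le cs n l (r + 1) (by omega)
  · exact h
termination_by n - r

theorem pvRunsLoop_acc (cs : List Char) (n i : Nat) (acc : List (Char × Int)) :
    pvRunsLoop cs n i acc = acc ++ pvRunsLoop cs n i [] := by
  by_cases h : i < n
  · rw [pvRunsLoop_pos cs n i acc h, pvRunsLoop_pos cs n i [] h, List.nil_append,
      pvRunsLoop_acc cs n (pvRunEnd cs n i i) (acc ++ _),
      pvRunsLoop_acc cs n (pvRunEnd cs n i i) [_]]
    simp
  · rw [pvRunsLoop_neg cs n i acc h, pvRunsLoop_neg cs n i [] h, List.append_nil]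
termination_by n - i
decreasing_by all_goals (have := pvRunEnd_gt cs n i h; omega)

theorem pvALoop_eq (cs : List Char) (n l : Nat) (m : PySem.Dict Char (List Int)) :
    pvALoop cs n l m = (pvRunsLoop cs n l []).foldl (fun m p => pvAStep m p.1 p.2) m := by
  by_cases h : l < n
  · rw [pvALoop_pos cs n l m h, pvRunsLoop_pos cs n l [] h, List.nil_append,
      pvRunsLoop_acc cs n (pvRunEnd cs n l l) [_],
      pvALoop_eq cs n (pvRunEnd cs n l l)]
    simp
  · rw [pvALoop_neg cs n l m h, pvRunsLoop_neg cs n l [] h, List.foldl_nil]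
termination_by n - l
decreasing_by all_goals (have := pvRunEnd_gt cs n l h; omega)

theorem pvRuns_bounds (cs : List Char) (n i : Nat) (hi : i ≤ n) :
    ∀ p ∈ pvRunsLoop cs n i [], 1 ≤ p.2 ∧ p.2 ≤ (n : Int) := by
  by_cases h : i < n
  · rw [pvRunsLoop_pos cs n i [] h, List.nil_append,
      pvRunsLoop_acc cs n (pvRunEnd cs n i i) [_]]
    intro p hp
    rcases List.mem_append.mp hp with hp | hp
    · simp only [List.mem_singleton] at hp
      subst hp
      have h1 := pvRunEnd_gt cs n i h
      have h2 := pvRunEnd_le cs n i i hi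
      simp only
      omega
    · exact pvRuns_bounds cs n (pvRunEnd cs n i i) (pvRunEnd_le cs n i i hi) p hp
  · rw [pvRunsLoop_neg cs n i [] h]; simp
termination_by n - i
decreasing_by all_goals (have := pvRunEnd_gt cs n i h; omega)

theorem pvKs_bounds (cs : List Char) (n : Nat) (hn : n = cs.length) (c : Char) :
    ∀ k ∈ pvKsOf (pvRunsLoop cs n 0 []) c, 1 ≤ k ∧ k ≤ (n : Int) := by
  intro k hk
  rcases List.mem_map.mp hk with ⟨p, hp, rfl⟩
  exact pvRuns_bounds cs n 0 (by omega) p (List.mem_of_mem_filter hp)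

-- ---- dict lemmas ----
theorem pvGetD_insertAppend (l : List Int) (m : PySem.Dict Char (List Int)) (c c' : Char) :
    ((l.foldl (fun m i => m.insert c (m.getD c [] ++ [i])) m).getD c' []) =
      m.getD c' [] ++ (if c' = c then l else []) := by
  induction l generalizing m with
  | nil => simp
  | cons x t ih =>
    simp only [List.foldl_cons]
    rw [ih]
    by_cases hc : c' = c
    · subst hc
      rw [PySem.Dict.getD_insert_self]
      simp
    · rw [PySem.Dict.getD_insert_of_ne _ _ _ hc]
      simp [hc]

theorem pvAStep_getD (m : PySem.Dict Char (List Int)) (c c' : Char) (k : Int) :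
    (pvAStep m c k).getD c' [] = m.getD c' [] ++ (if c' = c then pvCand k else []) :=
  pvGetD_insertAppend _ m c c'

theorem pvAFold_getD (runs : List (Char × Int)) (m : PySem.Dict Char (List Int)) (c : Char) :
    ((runs.foldl (fun m p => pvAStep m p.1 p.2) m).getD c []) =
      m.getD c [] ++ (pvKsOf runs c).flatMap pvCand := by
  induction runs generalizing m with
  | nil => simp [pvKsOf]
  | cons p t ih =>
    simp only [List.foldl_cons]
    rw [ih, pvAStep_getD]
    by_cases hc : c = p.1
    · subst hc
      simp [pvKsOf, List.filter_cons]
    · have hc' : ¬ p.1 = c := fun h => hc h.symm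
      simp [pvKsOf, List.filter_cons, hc, hc']

theorem pvGroups_getD (runs : List (Char × Int)) (c : Char) :
    (pvGroups runs).getD c [] = pvKsOf runs c := by
  have key : ∀ (d : PySem.Dict Char (List Int)),
      ((runs.foldl (fun d p => d.insert p.1 (d.getD p.1 [] ++ [p.2])) d).getD c []) =
        d.getD c [] ++ pvKsOf runs c := by
    induction runs with
    | nil => intro d; simp [pvKsOf]
    | cons p t ih =>
      intro d
      simp only [List.foldl_cons]
      rw [ih]
      by_cases hc : c = p.1
      · subst hc
        rw [PySem.Dict.getD_insert_self]
        simp [pvKsOf, List.filter_cons]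
      · have hc' : ¬ p.1 = c := fun h => hc h.symm
        rw [PySem.Dict.getD_insert_of_ne _ _ _ hc]
        simp [pvKsOf, List.filter_cons, hc, hc']
  have h := key PySem.Dict.empty
  simpa using h

theorem pvGroups_keys_mem (runs : List (Char × Int)) (c : Char) :
    c ∈ (pvGroups runs).keys ↔ c ∈ runs.map (·.1) := by
  unfold pvGroups
  rw [PySem.Dict.keys_foldl_insert_key runs (·.1) (fun d p => d.getD p.1 [] ++ [p.2])]
  rw [PySem.Set.mem_update]
  constructor
  · rintro (h | h)
    · simp [PySem.Dict.keys, PySem.Dict.empty] at h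
    · exact h
  · exact Or.inr

theorem pvGroups_keys_nodup (runs : List (Char × Int)) : (pvGroups runs).keys.Nodup := by
  unfold pvGroups
  apply PySem.Dict.nodup_keys_foldl_insert_key
  simp [PySem.Dict.keys, PySem.Dict.empty]

theorem pvCand_ne_nil (k : Int) (hk : 1 ≤ k) : pvCand k ≠ [] := by
  unfold pvCand
  rw [PySem.List.pyRange_neg_one_cons (by omega)]
  simp

theorem pvAStep_keys_mem (m : PySem.Dict Char (List Int)) (c c' : Char) (k : Int) :
    c' ∈ (pvAStep m c k).keys ↔ c' ∈ m.keys ∨ (c' = c ∧ pvCand k ≠ []) := by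
  unfold pvAStep
  rw [PySem.Dict.keys_foldl_insert_key _ (fun _ => c) (fun m i => m.getD c [] ++ [i])]
  rw [PySem.Set.mem_update]
  rw [show (PySem.List.pyRange k (max 0 (k - 4)) (-1)) = pvCand k from rfl]
  constructor
  · rintro (h | h)
    · exact Or.inl h
    · rcases List.mem_map.mp h with ⟨x, hx, rfl⟩
      exact Or.inr ⟨rfl, by intro hnil; rw [hnil] at hx; simp at hx⟩
  · rintro (h | ⟨rfl, hne⟩)
    · exact Or.inl h
    · rcases List.exists_mem_of_ne_nil _ hne with ⟨x, hx⟩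
      exact Or.inr (List.mem_map.mpr ⟨x, hx, rfl⟩)

theorem pvAFold_keys_mem (runs : List (Char × Int)) (c : Char)
    (hb : ∀ p ∈ runs, (1 : Int) ≤ p.2) :
    c ∈ ((runs.foldl (fun m p => pvAStep m p.1 p.2) PySem.Dict.empty).keys) ↔
      c ∈ runs.map (·.1) := by
  have key : ∀ (m : PySem.Dict Char (List Int)),
      c ∈ ((runs.foldl (fun m p => pvAStep m p.1 p.2) m).keys) ↔
        c ∈ m.keys ∨ ∃ p ∈ runs, c = p.1 ∧ pvCand p.2 ≠ [] := by
    induction runs with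
    | nil => intro m; simp
    | cons q t ih =>
      intro m
      simp only [List.foldl_cons]
      rw [ih fun p hp => hb p (List.mem_cons_of_mem _ hp), pvAStep_keys_mem]
      constructor
      · rintro ((h | h) | ⟨p, hp, h1, h2⟩)
        · exact Or.inl h
        · exact Or.inr ⟨q, List.mem_cons_self, h⟩
        · exact Or.inr ⟨p, List.mem_cons_of_mem _ hp, h1, h2⟩
      · rintro (h | ⟨p, hp, h1, h2⟩)
        · exact Or.inl (Or.inl h)
        · rcases List.mem_cons.mp hp with rfl | hp
          · exact Or.inl (Or.inr ⟨h1, h2⟩)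
          · exact Or.inr ⟨p, hp, h1, h2⟩
  rw [key PySem.Dict.empty]
  constructor
  · rintro (h | ⟨p, hp, rfl, _⟩)
    · simp [PySem.Dict.keys, PySem.Dict.empty] at h
    · exact List.mem_map.mpr ⟨p, hp, rfl⟩
  · intro h
    rcases List.mem_map.mp h with ⟨p, hp, rfl⟩
    exact Or.inr ⟨p, hp, rfl, pvCand_ne_nil p.2 (hb p hp)⟩

-- ---- ksOf nonempty ----
theorem pvKsOf_ne_nil_iff (runs : List (Char × Int)) (c : Char) :
    pvKsOf runs c ≠ [] ↔ c ∈ runs.map (·.1) := by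
  simp only [pvKsOf, ne_eq, List.map_eq_nil_iff, List.filter_eq_nil_iff, not_forall]
  constructor
  · rintro ⟨p, hp, hc⟩
    simp only [beq_iff_eq, not_not] at hc
    exact List.mem_map.mpr ⟨p, hp, hc⟩
  · intro h
    rcases List.mem_map.mp h with ⟨p, hp, hc⟩
    exact ⟨p, hp, by simp [hc]⟩

-- ---- counting lemmas ----
theorem pvCountP_range (n : Nat) (t : Int) :
    ((List.range n).countP (fun (j : Nat) => decide ((j : Int) ≤ t)) : Int) =
      max 0 (min (n : Int) (t + 1)) := by
  induction n with
  | zero => simp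
  | succ n ih =>
    rw [List.range_succ, List.countP_append]
    simp only [List.countP_singleton]
    by_cases hn : (n : Int) ≤ t
    · simp only [hn, decide_true]
      push_cast at ih ⊢
      omega
    · simp only [hn, decide_false]
      push_cast at ih ⊢
      omega

theorem pvCountP_cand (k L : Int) (hk : 1 ≤ k) (hL : 1 ≤ L) :
    ((pvCand k).countP (fun x => decide (L ≤ x)) : Int) = min 4 (max 0 (k - L + 1)) := by
  unfold pvCand
  rw [PySem.List.pyRange_neg_one, List.countP_map]
  have hcongr : ((List.range (k - max 0 (k - 4)).toNat).countP
      ((fun x => decide (L ≤ x)) ∘ (fun j : Nat => k - (j : Int)))) =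
      ((List.range (k - max 0 (k - 4)).toNat).countP (fun (j : Nat) => decide ((j : Int) ≤ k - L))) := by
    apply List.countP_congr
    intro j _
    simp only [Function.comp_apply]
    simp only [decide_eq_true_eq]
    constructor <;> (intro h; omega)
  rw [hcongr, pvCountP_range ((k - max 0 (k - 4)).toNat) (k - L)]
  omega

theorem pvCountP_flatMap (l : List Int) (f : Int → List Int) (p : Int → Bool) :
    (l.flatMap f).countP p = (l.map (fun x => (f x).countP p)).sum := by
  induction l with
  | nil => simp
  | cons x t ih => simp [List.flatMap_cons, List.countP_append, ih]

theorem pvTsum_eq (L : Int) (ks : List Int) :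
    pvTsum L ks = (ks.map (fun k => max 0 (k - L + 1))).sum := by
  unfold pvTsum
  induction ks with
  | nil => simp
  | cons k t ih =>
    simp only [List.filter_cons, List.map_cons, List.sum_cons]
    by_cases h : L ≤ k
    · simp only [h, decide_true, if_true, List.map_cons, List.sum_cons]
      rw [ih]
      omega
    · simp only [h, decide_false, Bool.false_eq_true, if_false]
      rw [ih]
      omega

theorem pvTsum_antitone (L L' : Int) (h : L ≤ L') (ks : List Int) :
    pvTsum L' ks ≤ pvTsum L ks := by
  rw [pvTsum_eq, pvTsum_eq]
  apply List.sum_le_sum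
  intro k _
  omega

-- the threshold-3 bridge: A keeps only 4 candidates per run, which preserves 'count ≥ 3'
theorem pvMin4_bridge (L : Int) (ks : List Int) :
    3 ≤ (ks.map (fun k => min 4 (max 0 (k - L + 1)))).sum ↔ 3 ≤ pvTsum L ks := by
  rw [pvTsum_eq]
  constructor
  · intro h
    have : (ks.map (fun k => min 4 (max 0 (k - L + 1)))).sum ≤
        (ks.map (fun k => max 0 (k - L + 1))).sum := by
      apply List.sum_le_sum
      intro k _
      omega
    omega
  · intro h
    by_cases hex : ∃ k ∈ ks, 3 ≤ max 0 (k - L + 1)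
    · rcases hex with ⟨k, hk, h3⟩
      have hmem : min 4 (max 0 (k - L + 1)) ∈ ks.map (fun k => min 4 (max 0 (k - L + 1))) :=
        List.mem_map.mpr ⟨k, hk, rfl⟩
      have hle := List.single_le_sum (l := ks.map (fun k => min 4 (max 0 (k - L + 1))))
        (by intro x hx; rcases List.mem_map.mp hx with ⟨k', _, rfl⟩; omega) _ hmem
      omega
    · push_neg at hex
      have : ks.map (fun k => min 4 (max 0 (k - L + 1))) = ks.map (fun k => max 0 (k - L + 1)) := by
        apply List.map_congr_left
        intro k hk
        have := hex k hk
        omega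
      rw [this]
      exact h

-- candidate count over the per-character candidate multiset
theorem pvCountGE_flat (ks : List Int) (L : Int) (hL : 1 ≤ L) (hks : ∀ k ∈ ks, 1 ≤ k) :
    (((ks.flatMap pvCand).countP (fun x => decide (L ≤ x)) : Nat) : Int) =
      (ks.map (fun k => min 4 (max 0 (k - L + 1)))).sum := by
  rw [pvCountP_flatMap]
  induction ks with
  | nil => simp
  | cons k t ih =>
    simp only [List.map_cons, List.sum_cons, Nat.cast_add]
    rw [pvCountP_cand k L (hks k (by simp)) hL,
        ih (fun k hk => hks k (List.mem_cons_of_mem _ hk))]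

-- elements of the candidate multiset are between 1 and n
theorem pvFlat_mem_bounds (ks : List Int) (n : Int) (hks : ∀ k ∈ ks, 1 ≤ k ∧ k ≤ n) :
    ∀ x ∈ ks.flatMap pvCand, 1 ≤ x ∧ x ≤ n := by
  intro x hx
  rcases List.mem_flatMap.mp hx with ⟨k, hk, hxk⟩
  rcases PySem.List.mem_pyRange_neg_one.mp hxk with ⟨h1, h2⟩
  have := hks k hk
  constructor <;> omega

-- ---- third largest ----
-- on a non-decreasing list, 'count of elements ≥ L is ≥ 3' is 'L ≤ third-from-the-end'
theorem pvSorted_count_iff (w : List Int) (hp : w.Pairwise (· ≤ ·)) (h3 : 3 ≤ w.length)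
    (L : Int) :
    (3 ≤ w.countP (fun x => decide (L ≤ x))) ↔ L ≤ w[w.length - 3]'(by omega) := by
  have hmono : ∀ p q : Nat, (hpq : p ≤ q) → (hq : q < w.length) → w[p]'(by omega) ≤ w[q] := by
    intro p q hpq hq
    rcases Nat.lt_or_ge p q with hlt | hge
    · exact List.pairwise_iff_getElem.mp hp p q (by omega) hq hlt
    · have : p = q := by omega
      subst this
      exact le_refl _
  constructor
  · intro hcount
    by_contra hL
    push_neg at hL
    rw [show w = w.take (w.length - 2) ++ w.drop (w.length - 2) from
      (List.take_append_drop _ _).symm, List.countP_append] at hcount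
    have htake : ((w.take (w.length - 2)).countP (fun x => decide (L ≤ x))) = 0 := by
      apply List.countP_eq_zero.mpr
      intro x hx
      rcases List.mem_iff_getElem.mp hx with ⟨j, hj, rfl⟩
      rw [List.getElem_take]
      have hjlt : j < w.length - 2 := by
        simp only [List.length_take] at hj
        omega
      have hle : w[j]'(by omega) ≤ w[w.length - 3]'(by omega) :=
        hmono j (w.length - 3) (by omega) (by omega)
      simp only [decide_eq_true_eq]
      omega
    have hdrop : ((w.drop (w.length - 2)).countP (fun x => decide (L ≤ x))) ≤ 2 := by
      calc ((w.drop (w.length - 2)).countP (fun x => decide (L ≤ x)))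
          ≤ (w.drop (w.length - 2)).length := List.countP_le_length
        _ = 2 := by rw [List.length_drop]; omega
    omega
  · intro hL
    rw [show w = w.take (w.length - 3) ++ w.drop (w.length - 3) from
      (List.take_append_drop _ _).symm, List.countP_append]
    have hdrop : ((w.drop (w.length - 3)).countP (fun x => decide (L ≤ x))) =
        (w.drop (w.length - 3)).length := by
      apply List.countP_eq_length.mpr
      intro x hx
      rcases List.mem_iff_getElem.mp hx with ⟨j, hj, rfl⟩
      rw [List.getElem_drop]
      have hjl : w.length - 3 + j < w.length := by
        rw [List.length_drop] at hj
        omega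
      have hle : w[w.length - 3]'(by omega) ≤ w[w.length - 3 + j]'hjl :=
        hmono _ _ (by omega) hjl
      simp only [decide_eq_true_eq]
      omega
    have hlen3 : (w.drop (w.length - 3)).length = 3 := by
      rw [List.length_drop]; omega
    omega

theorem pvThird_iff (v : List Int) (hv : 3 ≤ v.length) (L : Int) :
    (3 ≤ v.countP (fun x => decide (L ≤ x))) ↔
      L ≤ (PySem.List.sorted v (fun x => x))[v.length - 3]'(by
        rw [PySem.List.length_sorted]; omega) := by
  have hlen : (PySem.List.sorted v (fun x => x)).length = v.length :=
    PySem.List.length_sorted v _ _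
  have hperm : (PySem.List.sorted v (fun x => x)).Perm v := PySem.List.sorted_perm v _ _
  have hidx : (PySem.List.sorted v (fun x => x))[(PySem.List.sorted v (fun x => x)).length - 3]'(by
        omega) =
      (PySem.List.sorted v (fun x => x))[v.length - 3]'(by omega) :=
    getElem_congr rfl (by omega) (by omega)
  rw [← hidx, ← pvSorted_count_iff (PySem.List.sorted v (fun x => x))
    (PySem.List.sorted_pairwise v (fun x => x)) (by omega) L]
  rw [hperm.countP_congr (fun x _ => rfl)]

theorem pvThird_mem (v : List Int) (hv : 3 ≤ v.length) :
    (PySem.List.sorted v (fun x => x))[v.length - 3]'(by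
      rw [PySem.List.length_sorted]; omega) ∈ v := by
  rw [← PySem.List.mem_sorted (key := fun x : Int => x) (rev := false)]
  exact List.getElem_mem _

-- A's 'sorted(map[key])[-3]' is the third-largest element
theorem pvGval (v : List Int) (hv : 3 ≤ v.length) :
    ((PySem.List.pyGet? (PySem.List.sorted v (fun x => x)) (-3)).getD 0) =
      (PySem.List.sorted v (fun x => x))[v.length - 3]'(by
        rw [PySem.List.length_sorted]; omega) := by
  have hlen : (PySem.List.sorted v (fun x => x)).length = v.length :=
    PySem.List.length_sorted v _ _
  rw [PySem.List.pyGet?_neg_ofNat _ 3 (by omega) (by omega)]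
  rw [List.getElem?_eq_getElem (by omega)]
  simp only [Option.getD_some]
  congr 1
  omega

-- ---- fold-max over keys ----
theorem pvFoldlMax_spec (l : List Char) (cond : Char → Prop) [DecidablePred cond]
    (g : Char → Int) (init : Int) :
    (init ≤ l.foldl (fun out k => if cond k then max out (g k) else out) init) ∧
    (∀ c ∈ l, cond c → g c ≤ l.foldl (fun out k => if cond k then max out (g k) else out) init) ∧
    ((l.foldl (fun out k => if cond k then max out (g k) else out) init) = init ∨
      ∃ c ∈ l, cond c ∧ (l.foldl (fun out k => if cond k then max out (g k) else out) init) = g c) := by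
  induction l generalizing init with
  | nil => simp
  | cons a t ih =>
    simp only [List.foldl_cons, List.mem_cons]
    by_cases ha : cond a
    · rw [if_pos ha]
      rcases ih (max init (g a)) with ⟨h1, h2, h3⟩
      refine ⟨by omega, ?_, ?_⟩
      · rintro c (rfl | hc) hcond
        · omega
        · exact h2 c hc hcond
      · rcases h3 with h3 | ⟨c, hc, hcond, h3⟩
        · by_cases hle : init ≤ g a
          · exact Or.inr ⟨a, Or.inl rfl, ha, by omega⟩
          · left; omega
        · exact Or.inr ⟨c, Or.inr hc, hcond, h3⟩
    · rw [if_neg ha]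
      rcases ih init with ⟨h1, h2, h3⟩
      refine ⟨h1, ?_, ?_⟩
      · rintro c (rfl | hc) hcond
        · exact absurd hcond ha
        · exact h2 c hc hcond
      · rcases h3 with h3 | ⟨c, hc, hcond, h3⟩
        · exact Or.inl h3
        · exact Or.inr ⟨c, Or.inr hc, hcond, h3⟩

-- ---- bisect ----
theorem pvBisect_pos (g : PySem.Dict Char (List Int)) (lo hi best : Int) (h : lo ≤ hi) :
    pvBisect g lo hi best =
      (if pvFeasible g (PySem.Int.floordiv (lo + hi) 2) then
        pvBisect g (PySem.Int.floordiv (lo + hi) 2 + 1) hi (PySem.Int.floordiv (lo + hi) 2)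
      else pvBisect g lo (PySem.Int.floordiv (lo + hi) 2 - 1) best) := by
  rw [pvBisect]
  rw [dif_pos h]

theorem pvBisect_neg (g : PySem.Dict Char (List Int)) (lo hi best : Int) (h : ¬ lo ≤ hi) :
    pvBisect g lo hi best = best := by
  rw [pvBisect]
  rw [dif_neg h]

theorem pvBisect_correct (g : PySem.Dict Char (List Int))
    (hmono : ∀ L L' : Int, L ≤ L' → pvFeasible g L' = true → pvFeasible g L = true)
    (lo hi best : Int)
    (hlo : 1 ≤ lo) (hhi : lo - 1 ≤ hi)
    (habove : ∀ L, hi < L → pvFeasible g L = false)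
    (hbest : (best = -1 ∧ lo = 1) ∨ (best = lo - 1 ∧ pvFeasible g best = true ∧ 1 ≤ best)) :
    ((pvBisect g lo hi best = -1 ∧ ∀ L, 1 ≤ L → pvFeasible g L = false) ∨
      (pvFeasible g (pvBisect g lo hi best) = true ∧ 1 ≤ pvBisect g lo hi best ∧
        ∀ L, pvBisect g lo hi best < L → pvFeasible g L = false)) := by
  by_cases h : lo ≤ hi
  · rw [pvBisect_pos g lo hi best h]
    have hmid := PySem.Int.floordiv_two_mid_bounds h
    set mid := PySem.Int.floordiv (lo + hi) 2 with hmiddef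
    by_cases hf : pvFeasible g mid = true
    · rw [if_pos hf]
      exact pvBisect_correct g hmono (mid + 1) hi mid (by omega) (by omega) habove
        (Or.inr ⟨by omega, hf, by omega⟩)
    · rw [if_neg hf]
      refine pvBisect_correct g hmono lo (mid - 1) best hlo (by omega) ?_ hbest
      intro L hL
      by_cases hLhi : L ≤ hi
      · rcases Bool.eq_false_or_eq_true (pvFeasible g L) with h1 | h0
        · exact absurd (hmono mid L (by omega) h1) (by simpa using hf)
        · exact h0
      · exact habove L (by omega)
  · rw [pvBisect_neg g lo hi best h]
    rcases hbest with ⟨rfl, rfl⟩ | ⟨hb, hfeas, hb1⟩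
    · exact Or.inl ⟨rfl, fun L hL => habove L (by omega)⟩
    · exact Or.inr ⟨hfeas, hb1, fun L hL => habove L (by omega)⟩
termination_by (hi + 1 - lo).toNat
decreasing_by
  all_goals have := PySem.Int.floordiv_two_mid_bounds h
  all_goals omega

-- ---- feasibility bridge ----
theorem pvFeasible_iff (runs : List (Char × Int)) (L : Int) :
    pvFeasible (pvGroups runs) L = true ↔ ∃ c, 3 ≤ pvTsum L (pvKsOf runs c) := by
  unfold pvFeasible
  rw [List.any_eq_true]
  rw [PySem.Dict.values_eq_map_keys (pvGroups runs) (pvGroups_keys_nodup runs) []]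
  constructor
  · rintro ⟨ks, hks, hsum⟩
    rcases List.mem_map.mp hks with ⟨c, _, rfl⟩
    rw [pvGroups_getD] at hsum
    exact ⟨c, by simpa [pvTsum] using hsum⟩
  · rintro ⟨c, hc⟩
    have hne : pvKsOf runs c ≠ [] := by
      intro hnil
      rw [hnil] at hc
      simp [pvTsum] at hc
    have hmem : c ∈ (pvGroups runs).keys :=
      (pvGroups_keys_mem runs c).mpr ((pvKsOf_ne_nil_iff runs c).mp hne)
    refine ⟨(pvGroups runs).getD c [], List.mem_map.mpr ⟨c, hmem, rfl⟩, ?_⟩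
    rw [pvGroups_getD]
    simpa [pvTsum] using hc

-- a feasible count forces L ≤ n
theorem pvTs_le_n (cs : List Char) (n : Nat) (hn : n = cs.length) (L : Int) (c : Char)
    (hts : 3 ≤ pvTsum L (pvKsOf (pvRunsLoop cs n 0 []) c)) : L ≤ (n : Int) := by
  rw [pvTsum_eq] at hts
  by_contra hgt
  push_neg at hgt
  have hzero : ((pvKsOf (pvRunsLoop cs n 0 []) c).map (fun k => max 0 (k - L + 1))).sum ≤
      ((pvKsOf (pvRunsLoop cs n 0 []) c).map (fun _ => (0 : Int))).sum := by
    apply List.sum_le_sum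
    intro k hk
    have := pvKs_bounds cs n hn c k hk
    omega
  simp only [List.map_const', List.sum_replicate, smul_zero] at hzero
  omega

-- ---- the two sides compute pvBest ----
theorem pvB_best (s : String) :
    pvBest (pvRunsLoop s.toList s.toList.length 0 []) (maximumLength_alt s) := by
  have hmono : ∀ L L' : Int, L ≤ L' →
      pvFeasible (pvGroups (pvRunsLoop s.toList s.toList.length 0 [])) L' = true →
      pvFeasible (pvGroups (pvRunsLoop s.toList s.toList.length 0 [])) L = true := by
    intro L L' hLL h
    rcases (pvFeasible_iff _ _).mp h with ⟨c, hc⟩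
    exact (pvFeasible_iff _ _).mpr ⟨c, le_trans hc (pvTsum_antitone L L' hLL _)⟩
  have habove : ∀ L, (s.toList.length : Int) < L →
      pvFeasible (pvGroups (pvRunsLoop s.toList s.toList.length 0 [])) L = false := by
    intro L hL
    rcases Bool.eq_false_or_eq_true
      (pvFeasible (pvGroups (pvRunsLoop s.toList s.toList.length 0 [])) L) with h1 | h0
    · exfalso
      rcases (pvFeasible_iff _ _).mp h1 with ⟨c, hc⟩
      have := pvTs_le_n s.toList s.toList.length rfl L c hc
      omega
    · exact h0
  have hres := pvBisect_correct (pvGroups (pvRunsLoop s.toList s.toList.length 0 []))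
    hmono 1 (s.toList.length : Int) (-1) (le_refl 1) (by omega) habove (Or.inl ⟨rfl, rfl⟩)
  have heq : maximumLength_alt s =
      pvBisect (pvGroups (pvRunsLoop s.toList s.toList.length 0 []))
        1 (s.toList.length : Int) (-1) := rfl
  rw [heq]
  rcases hres with ⟨h1, h2⟩ | ⟨h1, h2, h3⟩
  · left
    refine ⟨h1, fun L hG => ?_⟩
    have hf := (pvFeasible_iff _ L).mpr hG.2
    rw [h2 L hG.1] at hf
    exact Bool.false_ne_true hf
  · right
    refine ⟨⟨h2, (pvFeasible_iff _ _).mp h1⟩, fun L hG => ?_⟩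
    by_contra hlt
    push_neg at hlt
    have hf := (pvFeasible_iff _ L).mpr hG.2
    rw [h3 L hlt] at hf
    exact Bool.false_ne_true hf

theorem pvA_best (s : String) :
    pvBest (pvRunsLoop s.toList s.toList.length 0 []) (maximumLength s) := by
  set cs := s.toList with hcs
  set n := cs.length with hn
  set runs := pvRunsLoop cs n 0 [] with hruns
  set md := pvALoop cs n 0 PySem.Dict.empty with hmddef
  have hmd : md = runs.foldl (fun m p => pvAStep m p.1 p.2) PySem.Dict.empty :=
    pvALoop_eq cs n 0 PySem.Dict.empty
  have hget : ∀ c, md.getD c [] = (pvKsOf runs c).flatMap pvCand := by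
    intro c
    rw [hmd, pvAFold_getD]
    simp
  have hb1 : ∀ p ∈ runs, (1 : Int) ≤ p.2 := by
    intro p hp
    exact (pvRuns_bounds cs n 0 (Nat.zero_le n) p hp).1
  have hkb : ∀ c, ∀ k ∈ pvKsOf runs c, 1 ≤ k ∧ k ≤ (n : Int) := fun c => pvKs_bounds cs n rfl c
  -- the count-threshold bridge per character
  have bridge3 : ∀ (c : Char) (L : Int), 1 ≤ L →
      ((3 ≤ (md.getD c []).countP (fun x => decide (L ≤ x))) ↔ 3 ≤ pvTsum L (pvKsOf runs c)) := by
    intro c L hL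
    rw [hget c]
    have h1 := pvCountGE_flat (pvKsOf runs c) L hL (fun k hk => (hkb c k hk).1)
    have h2 := pvMin4_bridge L (pvKsOf runs c)
    constructor
    · intro h
      apply h2.mp
      rw [← h1]
      exact_mod_cast h
    · intro h
      have h3 := h2.mpr h
      rw [← h1] at h3
      exact_mod_cast h3
  have heq : maximumLength s =
      md.keys.foldl
        (fun out k =>
          if 3 ≤ (md.getD k []).length then
            max out ((PySem.List.pyGet? (PySem.List.sorted (md.getD k []) (fun x => x)) (-3)).getD 0)
          else out)
        (-1) := rfl
  obtain ⟨hinit, hub, hcases⟩ := pvFoldlMax_spec md.keys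
    (fun c => 3 ≤ (md.getD c []).length)
    (fun c => (PySem.List.pyGet? (PySem.List.sorted (md.getD c []) (fun x => x)) (-3)).getD 0)
    (-1)
  rw [heq]
  -- upper bound: every feasible L is at most A's output
  have hubL : ∀ L, pvG runs L →
      L ≤ md.keys.foldl
        (fun out k =>
          if 3 ≤ (md.getD k []).length then
            max out ((PySem.List.pyGet? (PySem.List.sorted (md.getD k []) (fun x => x)) (-3)).getD 0)
          else out)
        (-1) := by
    rintro L ⟨hL1, c, hts⟩
    have hcnt : 3 ≤ (md.getD c []).countP (fun x => decide (L ≤ x)) := (bridge3 c L hL1).mpr hts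
    have hlen : 3 ≤ (md.getD c []).length := le_trans hcnt List.countP_le_length
    have hne : pvKsOf runs c ≠ [] := by
      intro hnil
      rw [hget c, hnil] at hlen
      simp at hlen
    have hkeys : c ∈ md.keys := by
      rw [hmd]
      exact (pvAFold_keys_mem runs c hb1).mpr ((pvKsOf_ne_nil_iff runs c).mp hne)
    have hthird := (pvThird_iff (md.getD c []) hlen L).mp hcnt
    have hgv := pvGval (md.getD c []) hlen
    have hcb := hub c hkeys hlen
    rw [hgv] at hcb
    exact le_trans hthird hcb
  rcases hcases with hout | ⟨c, hc, hcond, hout⟩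
  · left
    refine ⟨hout, fun L hG => ?_⟩
    have h1 := hubL L hG
    have h2 := hG.1
    rw [hout] at h1
    omega
  · right
    rw [hout]
    have hgv := pvGval (md.getD c []) hcond
    rw [hgv]
    have hmem := pvThird_mem (md.getD c []) hcond
    have hbnd : ∀ x ∈ md.getD c [], 1 ≤ x ∧ x ≤ (n : Int) := by
      rw [hget c]
      exact pvFlat_mem_bounds (pvKsOf runs c) (n : Int) (hkb c)
    have h1le : 1 ≤ (PySem.List.sorted (md.getD c []) (fun x => x))[(md.getD c []).length - 3]'(by
        rw [PySem.List.length_sorted]; omega) := (hbnd _ hmem).1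
    have hcnt3 : 3 ≤ (md.getD c []).countP (fun x => decide
        ((PySem.List.sorted (md.getD c []) (fun x => x))[(md.getD c []).length - 3]'(by
          rw [PySem.List.length_sorted]; omega) ≤ x)) :=
      (pvThird_iff (md.getD c []) hcond _).mpr (le_refl _)
    have hts := (bridge3 c _ h1le).mp hcnt3
    refine ⟨⟨h1le, c, hts⟩, fun L hG => ?_⟩
    have h1 := hubL L hG
    rw [hout, hgv] at h1
    exact h1

-- ===== VERDICT (by name: the statement is the Claim_ definition above) =====
theorem maximumLength_spec : Claim_equal_maximumLength := by
  intro s _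
  unfold Spec_maximumLength
  exact pvBest_unique _ _ _ (pvA_best s) (pvB_best s)
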